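-- pv_equiv track=rewrite | github.com/rahulpatel5/advent-of-code | 2025/aoc_5a/aoc5a_functions.py | get_ingredient_info
-- ===== SOURCE A (Python) =====
-- def get_ingredient_info(input: list) -> tuple[list, list]:
--     """
--     Takes list of string values and parses this into separate lists.
--
--     Args:
--         input (list): list of strings (the puzzle input)
--
--     Returns:
--         tuple[list, list]: two lists, one of 'fresh ingredients' and the other of available ingredients
--     """
--
--     fresh: list = []
--     available: list = []
--     for row in input:
--         # if there's a hyphen, we're looking at 'fresh' ingredients
--         if row.find('-') != -1:
--             num_strings: list = row.split('-')
--             fresh.append([int(num_strings[0]), int(num_strings[1])])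
--         # if row is empty then skip
--         elif row == '':
--             continue
--         # otherwise we're in the available ingredients values
--         else:
--             available.append(int(row))
--     return (fresh, available)
-- ===== SOURCE B (Python) =====
-- def get_ingredient_info(input: list) -> tuple[list, list]:
--     """Hand-rolled single-scan hyphen tokenizer per row (a tiny state machine)
--     instead of str.find/str.split; rows are classified by the number of pieces."""
--     fresh = []
--     available = []
--     for row in input:
--         done = []
--         cur = ''
--         for ch in row:
--             if ch == '-':
--                 done.append(cur)
--                 cur = ''
--             else:
--                 cur += ch
--         pieces = done + [cur]
--         if len(pieces) > 1:
--             fresh.append([int(pieces[0]), int(pieces[1])])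
--         elif row != '':
--             available.append(int(row))
--     return (fresh, available)
-- ===== Notes on version B (the rewrite author's own statement) =====
-- stated objective: alternative
-- what changed: Replaces the str.find membership test and str.split call by a hand-rolled single character-scan tokenizer per row (state machine accumulating pieces), with the fresh/available classification decided by the resulting piece count instead of a hyphen search.
import Mathlib
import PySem

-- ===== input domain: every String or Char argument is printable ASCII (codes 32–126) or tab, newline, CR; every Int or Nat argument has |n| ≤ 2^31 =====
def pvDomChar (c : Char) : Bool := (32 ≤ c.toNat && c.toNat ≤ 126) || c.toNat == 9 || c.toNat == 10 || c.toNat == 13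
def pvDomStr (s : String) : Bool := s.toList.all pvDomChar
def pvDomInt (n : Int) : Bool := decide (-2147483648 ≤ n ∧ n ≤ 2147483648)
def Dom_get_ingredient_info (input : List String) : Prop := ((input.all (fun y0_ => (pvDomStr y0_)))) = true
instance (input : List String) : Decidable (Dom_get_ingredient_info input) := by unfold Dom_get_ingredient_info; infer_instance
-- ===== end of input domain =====

-- B replaces A's str.find test and str.split call by a hand-rolled character-scan tokenizer
-- per row, classifying rows by the resulting piece count; same values, alternative mechanism.

-- ===== PORT A =====
-- one loop over the rows; per row: find('-'), split('-'), append to one of two accumulators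
def get_ingredient_info (input : List String) : List (List Int) × List Int :=
  input.foldl (fun (st : List (List Int) × List Int) row =>
    if PySem.Str.find row "-" ≠ -1 then
      let num_strings : List String := (PySem.Str.split? row "-").getD []
      (st.1 ++ [[(PySem.Int.ofStr? (num_strings.getD 0 "")).getD 0,
                 (PySem.Int.ofStr? (num_strings.getD 1 "")).getD 0]], st.2)
    else if row = "" then st
    else (st.1, st.2 ++ [(PySem.Int.ofStr? row).getD 0])) ([], [])

-- ===== PORT B =====
-- per-row character scanner: (done pieces, current piece) state, '-' closes the current piece
def pvScanStep (st : List (List Char) × List Char) (ch : Char) : List (List Char) × List Char :=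
  if ch = '-' then (st.1 ++ [st.2], []) else (st.1, st.2 ++ [ch])

def pvPieces (row : String) : List (List Char) :=
  let st := row.toList.foldl pvScanStep ([], [])
  st.1 ++ [st.2]

def get_ingredient_info_alt (input : List String) : List (List Int) × List Int :=
  input.foldl (fun (st : List (List Int) × List Int) row =>
    let pieces := pvPieces row
    if 1 < pieces.length then
      (st.1 ++ [[(PySem.Int.ofStr? (String.ofList (pieces.getD 0 []))).getD 0,
                 (PySem.Int.ofStr? (String.ofList (pieces.getD 1 []))).getD 0]], st.2)
    else if row ≠ "" then (st.1, st.2 ++ [(PySem.Int.ofStr? row).getD 0])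
    else st) ([], [])

-- ===== PRECONDITION & SPEC =====
-- rowOk row: Python's int() succeeds on every string the code feeds it for this row
def rowOk (row : String) : Bool :=
  let l := row.toList
  if l.contains '-' then
    (PySem.Int.ofStr? (String.ofList (l.takeWhile (· ≠ '-')))).isSome &&
    (PySem.Int.ofStr? (String.ofList (((l.dropWhile (· ≠ '-')).drop 1).takeWhile (· ≠ '-')))).isSome
  else row.isEmpty || (PySem.Int.ofStr? row).isSome

-- Pre_ excludes exactly the inputs on which A raises ValueError: a row whose int() argument is
-- not an integer literal (a non-numeric row, or a hyphen row whose first two '-'-separated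
-- pieces are not integers, e.g. a lone negative number like "-5").
def Pre_get_ingredient_info (input : List String) : Prop := ∀ row ∈ input, rowOk row = true
instance (input : List String) : Decidable (Pre_get_ingredient_info input) := by
  unfold Pre_get_ingredient_info; infer_instance

def pvWitness_get_ingredient_info : List String := ["12-34", "56-78", "90", "1234"]

def Spec_get_ingredient_info (input : List String) (out : List (List Int) × List Int) : Prop := out = get_ingredient_info_alt input
instance (input : List String) (out : List (List Int) × List Int) : Decidable (Spec_get_ingredient_info input out) := by unfold Spec_get_ingredient_info; infer_instance

-- ===== CLAIM =====
def Claim_equal_get_ingredient_info : Prop := ∀ (input : List String), Dom_get_ingredient_info input → Pre_get_ingredient_info input → Spec_get_ingredient_info input (get_ingredient_info input)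

-- ===== LEMMAS AND PROOFS =====

-- reference splitter: first piece and remaining pieces of splitting on '-'
def pvP : List Char → List Char × List (List Char)
  | [] => ([], [])
  | c :: rest => if c = '-' then ([], (pvP rest).1 :: (pvP rest).2)
                 else (c :: (pvP rest).1, (pvP rest).2)

theorem scan_eq (cs : List Char) : ∀ (done : List (List Char)) (cur : List Char),
    (cs.foldl pvScanStep (done, cur)).1 ++ [(cs.foldl pvScanStep (done, cur)).2]
      = done ++ (cur ++ (pvP cs).1) :: (pvP cs).2 := by
  induction cs with
  | nil => intro done cur; simp [pvP]
  | cons c rest ih =>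
    intro done cur
    by_cases hc : c = '-'
    · simp [pvScanStep, pvP, hc, ih]
    · simp [pvScanStep, pvP, hc, ih]

theorem pvPieces_eq (row : String) :
    pvPieces row = (pvP row.toList).1 :: (pvP row.toList).2 := by
  unfold pvPieces
  simpa using scan_eq row.toList [] []

set_option maxRecDepth 4000 in
theorem go_eq (cs : List Char) : ∀ (fuel : Nat) (cur : List Char) (acc : List (List Char)),
    cs.length ≤ fuel →
    PySem.Chars.splitOn.go ['-'] fuel cs cur acc
      = acc.reverse ++ (cur.reverse ++ (pvP cs).1) :: (pvP cs).2 := by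
  induction cs with
  | nil =>
    intro fuel cur acc _
    cases fuel with
    | zero => simp [PySem.Chars.splitOn.go, pvP]
    | succ n => simp [PySem.Chars.splitOn.go, pvP]
  | cons c rest ih =>
    intro fuel cur acc hf
    cases fuel with
    | zero => simp at hf
    | succ n =>
      have hn : rest.length ≤ n := by simpa using hf
      have hgo : PySem.Chars.splitOn.go ['-'] (n+1) (c::rest) cur acc =
          if (['-'] : List Char).isPrefixOf (c::rest) then
            PySem.Chars.splitOn.go ['-'] n (List.drop 1 (c::rest)) [] (cur.reverse::acc)
          else PySem.Chars.splitOn.go ['-'] n rest (c::cur) acc := rfl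
      rw [hgo]
      by_cases hc : c = '-'
      · rw [if_pos (by simp [List.isPrefixOf, hc])]
        simp [ih n [] (cur.reverse :: acc) hn, pvP, hc]
      · rw [if_neg (by simp [List.isPrefixOf]; intro h; exact absurd h.symm hc)]
        simp [ih n (c :: cur) acc hn, pvP, hc]

theorem splitOn_eq (cs : List Char) :
    PySem.Chars.splitOn cs ['-'] = (pvP cs).1 :: (pvP cs).2 := by
  unfold PySem.Chars.splitOn
  simpa using go_eq cs (cs.length + 1) [] [] (by omega)

theorem pvP_snd_length (cs : List Char) : (pvP cs).2.length = cs.count '-' := by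
  induction cs with
  | nil => simp [pvP]
  | cons c rest ih =>
    by_cases hc : c = '-'
    · simp [pvP, hc, ih]
    · simp [pvP, hc, ih]

theorem hyphen_infix_iff (row : String) :
    ("-".toList <:+: row.toList) ↔ '-' ∈ row.toList := by
  have hsep : ("-" : String).toList = ['-'] := rfl
  rw [hsep]
  constructor
  · intro h; exact h.subset (List.mem_singleton_self '-')
  · intro h
    obtain ⟨s, t, ht⟩ := List.append_of_mem h
    exact ⟨s, t, by rw [ht]; simp⟩

theorem cond_iff (row : String) :
    (PySem.Str.find row "-" ≠ -1) ↔ 1 < (pvPieces row).length := by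
  rw [PySem.Str.find_ne_neg_one_iff, pvPieces_eq]
  rw [hyphen_infix_iff]
  simp [pvP_snd_length, ← List.count_pos_iff]

-- the two per-row step functions agree
theorem step_eq (st : List (List Int) × List Int) (row : String) :
    (if PySem.Str.find row "-" ≠ -1 then
      let num_strings : List String := (PySem.Str.split? row "-").getD []
      (st.1 ++ [[(PySem.Int.ofStr? (num_strings.getD 0 "")).getD 0,
                 (PySem.Int.ofStr? (num_strings.getD 1 "")).getD 0]], st.2)
    else if row = "" then st
    else (st.1, st.2 ++ [(PySem.Int.ofStr? row).getD 0]))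
    =
    (let pieces := pvPieces row
     if 1 < pieces.length then
      (st.1 ++ [[(PySem.Int.ofStr? (String.ofList (pieces.getD 0 []))).getD 0,
                 (PySem.Int.ofStr? (String.ofList (pieces.getD 1 []))).getD 0]], st.2)
     else if row ≠ "" then (st.1, st.2 ++ [(PySem.Int.ofStr? row).getD 0])
     else st) := by
  by_cases h : PySem.Str.find row "-" ≠ -1
  · rw [if_pos h]
    have hb := (cond_iff row).mp h
    simp only [pvPieces_eq] at hb ⊢
    rw [if_pos hb]
    -- hyphen present ⇒ (pvP row.toList).2 is nonempty
    have hmem : '-' ∈ row.toList :=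
      (hyphen_infix_iff row).mp ((PySem.Str.find_ne_neg_one_iff row "-").mp h)
    have hlen : 0 < (pvP row.toList).2.length := by
      rw [pvP_snd_length]; exact List.count_pos_iff.mpr hmem
    obtain ⟨q, qs, hq⟩ : ∃ q qs, (pvP row.toList).2 = q :: qs := by
      cases hx : (pvP row.toList).2 with
      | nil => rw [hx] at hlen; simp at hlen
      | cons q qs => exact ⟨q, qs, rfl⟩
    have hsplit : PySem.Str.split? row "-"
        = some (((pvP row.toList).1 :: (pvP row.toList).2).map String.ofList) := by
      have hsep : ("-" : String).toList = ['-'] := rfl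
      unfold PySem.Str.split?
      rw [hsep]
      simp [PySem.Chars.split?, splitOn_eq]
    simp [hsplit, hq]
  · rw [if_neg h]
    have hb : ¬ 1 < (pvPieces row).length := fun hc => h ((cond_iff row).mpr hc)
    simp only [pvPieces_eq] at hb ⊢
    rw [if_neg hb]
    by_cases he : row = "" <;> simp [he]

-- ===== VERDICT =====
theorem get_ingredient_info_spec : Claim_equal_get_ingredient_info := by
  intro input _ _
  unfold Spec_get_ingredient_info get_ingredient_info get_ingredient_info_alt
  exact (PySem.List.foldl_congr_mem input _ _ ([], []) (fun st row _ => step_eq st row))
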